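-- pv_equiv track=rewrite | github.com/dstreta47/ProblemSolving | leftmost.py | leftmost
-- ===== SOURCE A (Python) =====
-- def leftmost(test):
--     char = [-1]*256
--     res = 99999
--
--     for i in range(len(test)):
--         if char[ord(test[i])] == -1:
--             char[ord(test[i])] =i
--         else:
--             res = min(res,char[ord(test[i])])
--     return res
--
-- test = 'abcdefgbac'
-- ===== SOURCE B (Python) =====
-- def leftmost(test):
--     counts = {}
--     for c in test:
--         counts[c] = counts.get(c, 0) + 1
--     return min([i for i, c in enumerate(test) if counts[c] > 1] + [99999])
-- ===== Notes on version B (the rewrite author's own statement) =====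
-- stated objective: simpler
-- what changed: B builds a character frequency table in one pass and then takes the min (with the 99999 sentinel) over the indices whose character occurs more than once, instead of A's fused single pass maintaining a 256-slot first-seen-index array and a running min of first-occurrence indices.
import Mathlib
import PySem

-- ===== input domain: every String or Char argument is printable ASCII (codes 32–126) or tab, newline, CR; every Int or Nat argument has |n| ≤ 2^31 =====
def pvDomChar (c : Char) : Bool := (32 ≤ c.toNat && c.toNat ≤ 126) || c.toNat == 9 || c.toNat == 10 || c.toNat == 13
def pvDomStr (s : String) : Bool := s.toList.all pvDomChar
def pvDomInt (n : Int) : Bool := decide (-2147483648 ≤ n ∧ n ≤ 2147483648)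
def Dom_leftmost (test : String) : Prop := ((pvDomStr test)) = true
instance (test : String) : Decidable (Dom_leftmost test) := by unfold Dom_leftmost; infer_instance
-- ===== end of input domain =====

-- B replaces A's fused pass (256-slot first-seen-index array plus running min) by a frequency
-- table built in one pass followed by min over the indices of repeated characters: simpler.

-- ===== PORT A =====
-- test[i] is ported as pyGetD on test.toList (exact: i ∈ range(len(test)) is always in range);
-- ord(c) is Char.toNat (exact on the ASCII domain).
def leftmost (test : String) : Int :=
  let st := (PySem.List.pyRange 0 (PySem.Str.len test) 1).foldl
    (fun (st : List Int × Int) i =>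
      let c := PySem.List.pyGetD test.toList i ' '
      if st.1.getD c.toNat 0 = -1 then (st.1.set c.toNat i, st.2)
      else (st.1, min st.2 (st.1.getD c.toNat 0)))
    (List.replicate 256 (-1 : Int), (99999 : Int))
  st.2

-- ===== PORT B =====
-- counts.get(c, 0) is Dict.getD; the comprehension is the append-if fold over enumerate;
-- min of a nonempty list is PySem.List.min?.
def leftmost_alt (test : String) : Int :=
  let counts := test.toList.foldl
    (fun (d : PySem.Dict Char Int) c => d.insert c (d.getD c 0 + 1)) PySem.Dict.empty
  let cands := (PySem.List.enumerate test.toList 0).foldl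
    (fun (acc : List Int) q => if counts.getD q.2 0 > 1 then acc ++ [q.1] else acc) []
  (PySem.List.min? (cands ++ [(99999 : Int)]) (fun x => x)).getD 0

-- ===== PRECONDITION & SPEC =====
def Spec_leftmost (test : String) (out : Int) : Prop := out = leftmost_alt test
instance (test : String) (out : Int) : Decidable (Spec_leftmost test out) := by unfold Spec_leftmost; infer_instance

-- ===== CLAIM (what is proved, stated in full; the proofs are below) =====
def Claim_equal_leftmost : Prop := ∀ (test : String), Dom_leftmost test → Spec_leftmost test (leftmost test)

-- ===== LEMMAS AND PROOFS =====

-- getD after set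
theorem pvGetD_set (l : List Int) (n m : Nat) (v d : Int) (hn : n < l.length) :
    (l.set n v).getD m d = if m = n then v else l.getD m d := by
  by_cases hm : m = n
  · subst hm
    rw [if_pos rfl, List.getD, List.getElem?_set_self hn, Option.getD_some]
  · rw [if_neg hm, List.getD, List.getD, List.getElem?_set_ne (fun hh => hm hh.symm)]

-- foldl-min toolkit
theorem pvFoldlMin_le_init (l : List Int) (a : Int) : l.foldl min a ≤ a := by
  induction l generalizing a with
  | nil => exact le_refl a
  | cons x t ih => exact le_trans (ih (min a x)) (min_le_left _ _)

theorem pvFoldlMin_le_mem (l : List Int) : ∀ (a x : Int), x ∈ l → l.foldl min a ≤ x := by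
  induction l with
  | nil => intro a x hx; cases hx
  | cons y t ih =>
    intro a x hx
    rcases List.mem_cons.mp hx with h | h
    · subst h; exact le_trans (pvFoldlMin_le_init t (min a x)) (min_le_right _ _)
    · exact ih (min a y) x h

theorem pvLe_foldlMin (l : List Int) (a b : Int) (hb : b ≤ a) (h : ∀ x ∈ l, b ≤ x) :
    b ≤ l.foldl min a := by
  induction l generalizing a with
  | nil => exact hb
  | cons x t ih =>
    exact ih (min a x) (le_min hb (h x (List.mem_cons_self))) fun y hy => h y (List.mem_cons_of_mem _ hy)

theorem pvFoldlMin_min (l : List Int) (a b : Int) :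
    l.foldl min (min a b) = min a (l.foldl min b) := by
  induction l generalizing b with
  | nil => rfl
  | cons x t ih => simpa [min_assoc] using ih (min b x)

-- two distinct positions with the same character give count ≥ 2
theorem pvTwo_le_count (cs : List Char) (k j : Nat) (hk : k < cs.length) (hj : j < cs.length)
    (hlt : k < j) (h : cs[k] = cs[j]) : 2 ≤ cs.count cs[j] := by
  have hsplit := (List.take_append_drop j cs).symm
  have hmem1 : cs[j] ∈ cs.take j := by
    have : (cs.take j)[k]'(by rw [List.length_take]; omega) = cs[k] := List.getElem_take
    rw [← h, ← this]; exact List.getElem_mem _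
  have hmem2 : cs[j] ∈ cs.drop j := by
    have : (cs.drop j)[0]'(by rw [List.length_drop]; omega) = cs[j] := by simp
    rw [← this]; exact List.getElem_mem _
  calc 2 = 1 + 1 := rfl
    _ ≤ (cs.take j).count cs[j] + (cs.drop j).count cs[j] :=
        Nat.add_le_add (List.one_le_count_iff.mpr hmem1) (List.one_le_count_iff.mpr hmem2)
    _ = cs.count cs[j] := by rw [← List.count_append, List.take_append_drop]

-- abstract trace of A's loop: the list of values min'd into res, with the table as a function
def pvG (l : List Char) (s : Int) (t : Char → Int) : List Int :=
  match l with
  | [] => []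
  | c :: l' => if t c = -1 then pvG l' (s+1) (fun c' => if c' = c then s else t c') else t c :: pvG l' (s+1) t

theorem pvAloop (l : List Char) (s : Int) (char : List Int) (res : Int) (t : Char → Int)
    (hlen : char.length = 256)
    (hdom : ∀ c ∈ l, c.toNat < 256)
    (htab : ∀ c ∈ l, char.getD c.toNat 0 = t c) :
    ((PySem.List.enumerate l s).foldl
      (fun (st : List Int × Int) (q : Int × Char) =>
        if st.1.getD q.2.toNat 0 = -1 then (st.1.set q.2.toNat q.1, st.2)
        else (st.1, min st.2 (st.1.getD q.2.toNat 0))) (char, res)).2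
    = (pvG l s t).foldl min res := by
  induction l generalizing s char res t with
  | nil => simp [PySem.List.enumerate, pvG]
  | cons c l' ih =>
    rw [PySem.List.enumerate_cons]
    have hc256 : c.toNat < 256 := hdom c (List.mem_cons_self)
    have htc : char.getD c.toNat 0 = t c := htab c (List.mem_cons_self)
    simp only [List.foldl_cons, pvG]
    rw [htc]
    by_cases h : t c = -1
    · simp only [h, if_true]
      refine ih (s+1) _ res (fun c' => if c' = c then s else t c') (by simp [hlen])
        (fun x hx => hdom x (List.mem_cons_of_mem _ hx)) ?_
      intro c' hc'
      rw [pvGetD_set _ _ _ _ _ (by omega)]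
      show _ = if c' = c then s else t c'
      by_cases he : c' = c
      · simp [he]
      · have hne : ¬ c'.toNat = c.toNat := fun hn => he (Char.ext (UInt32.toNat_inj.mp hn))
        rw [if_neg hne, if_neg he, htab c' (List.mem_cons_of_mem _ hc')]
    · simp only [if_neg h]
      rw [ih (s+1) char (min res (t c)) t hlen
        (fun x hx => hdom x (List.mem_cons_of_mem _ hx))
        (fun x hx => htab x (List.mem_cons_of_mem _ hx))]
      simp [List.foldl_cons]

-- every value A mins in is the index of a character occurring at least twice
theorem pvG_sound (l p : List Char) (t : Char → Int) (cs : List Char)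
    (hcs : cs = p ++ l)
    (h2 : ∀ c, t c ≠ -1 → ∃ k : Nat, t c = (k : Int) ∧ k < p.length ∧ ∃ hk : k < cs.length, cs[k] = c) :
    ∀ x ∈ pvG l (p.length : Int) t, ∃ k : Nat, x = (k : Int) ∧ ∃ hk : k < cs.length, 2 ≤ cs.count cs[k] := by
  induction l generalizing p t with
  | nil => intro x hx; simp [pvG] at hx
  | cons c l' ih =>
    intro x hx
    have hplen : p.length < cs.length := by subst hcs; simp
    have hcsp : cs[p.length]'hplen = c := by
      subst hcs
      rw [List.getElem_append_right (le_refl _)]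
      simp
    by_cases h : t c = -1
    · rw [pvG, if_pos h] at hx
      have : ((p.length : Int) + 1) = ((p ++ [c]).length : Int) := by simp
      rw [this] at hx
      refine ih (p ++ [c]) _ (by simpa using hcs) ?_ x hx
      intro c' hc'
      by_cases he : c' = c
      · refine ⟨p.length, by simp [he], by simp, hplen, ?_⟩
        rw [hcsp, he]
      · rcases h2 c' (by simpa [he] using hc') with ⟨k, hk1, hk2, hk3, hk4⟩
        refine ⟨k, by simp [he, hk1], by simp only [List.length_append, List.length_singleton]; omega, hk3, hk4⟩
    · rw [pvG, if_neg h] at hx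
      rcases List.mem_cons.mp hx with hx | hx
      · rcases h2 c h with ⟨k, hk1, hk2, hk3, hk4⟩
        refine ⟨k, hx.trans hk1, hk3, ?_⟩
        have := pvTwo_le_count cs k p.length hk3 hplen hk2 (by rw [hk4, hcsp])
        rw [hk4, ← hcsp] at *
        simpa [hcsp] using this
      · have : ((p.length : Int) + 1) = ((p ++ [c]).length : Int) := by simp
        rw [this] at hx
        refine ih (p ++ [c]) t (by simpa using hcs) ?_ x hx
        intro c' hc'
        rcases h2 c' hc' with ⟨k, hk1, hk2, hk3, hk4⟩
        exact ⟨k, hk1, by simp only [List.length_append, List.length_singleton]; omega, hk3, hk4⟩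

-- every repeated character contributes a value ≤ each of its positions
theorem pvG_cover (l p : List Char) (t : Char → Int) (cs : List Char)
    (hcs : cs = p ++ l)
    (h5 : ∀ c, t c ≠ -1 → ∀ j : Nat, ∀ hj : j < cs.length, cs[j] = c → t c ≤ (j : Int))
    (h6 : ∀ c, t c = -1 → c ∉ p) :
    ∀ c, ((t c ≠ -1 ∧ c ∈ l) ∨ 2 ≤ l.count c) →
      ∃ g ∈ pvG l (p.length : Int) t, ∀ j : Nat, ∀ hj : j < cs.length, cs[j] = c → g ≤ (j : Int) := by
  induction l generalizing p t with
  | nil => intro c hc; rcases hc with ⟨_, h⟩ | h <;> simp_all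
  | cons c0 l' ih =>
    intro c hc
    have hplen : p.length < cs.length := by subst hcs; simp
    have hcsp : cs[p.length]'hplen = c0 := by
      subst hcs
      rw [List.getElem_append_right (le_refl _)]
      simp
    have hlen1 : ((p.length : Int) + 1) = ((p ++ [c0]).length : Int) := by simp
    by_cases h : t c0 = -1
    · rw [pvG, if_pos h, hlen1]
      set t' : Char → Int := fun c' => if c' = c0 then (p.length : Int) else t c' with ht'
      have h5' : ∀ c', t' c' ≠ -1 → ∀ j : Nat, ∀ hj : j < cs.length, cs[j] = c' → t' c' ≤ (j : Int) := by
        intro c' hne j hj hcj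
        by_cases he : c' = c0
        · subst he
          simp only [ht', if_pos rfl]
          -- cs[j] = c', c' not in p, so j ≥ p.length
          by_contra hlt
          have hjp : j < p.length := by omega
          have : cs[j] ∈ p := by
            subst hcs
            rw [List.getElem_append_left hjp]
            exact List.getElem_mem _
          exact h6 c' h (hcj ▸ this)
        · simp only [ht', if_neg he] at hne ⊢
          exact h5 c' hne j hj hcj
      have h6' : ∀ c', t' c' = -1 → c' ∉ p ++ [c0] := by
        intro c' he
        by_cases hq : c' = c0
        · simp [ht', hq] at he
        · simp only [ht', if_neg hq] at he
          simp [List.mem_append, hq]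
          exact h6 c' he
      rcases hc with ⟨hne, hmem⟩ | hcnt
      · rcases List.mem_cons.mp hmem with he | hmem'
        · exact absurd (he ▸ h) hne
        · have : t' c ≠ -1 := by
            by_cases hq : c = c0
            · simp [ht', hq]
            · simpa [ht', hq] using hne
          exact ih (p ++ [c0]) t' (by simpa using hcs) h5' h6' c (Or.inl ⟨this, hmem'⟩)
      · by_cases hq : c = c0
        · have hmem' : c ∈ l' := by
            have h2c := hcnt
            rw [hq, List.count_cons_self] at h2c
            rw [hq]
            exact List.count_pos_iff.mp (by omega)
          have hne' : t' c ≠ -1 := by simp [ht', hq]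
          exact ih (p ++ [c0]) t' (by simpa using hcs) h5' h6' c (Or.inl ⟨hne', hmem'⟩)
        · have : 2 ≤ l'.count c := by
            have hq' : ¬ c0 = c := fun hh => hq hh.symm
            simpa [List.count_cons, beq_iff_eq, hq'] using hcnt
          exact ih (p ++ [c0]) t' (by simpa using hcs) h5' h6' c (Or.inr this)
    · rw [pvG, if_neg h, hlen1]
      have h6' : ∀ c', t c' = -1 → c' ∉ p ++ [c0] := by
        intro c' he
        simp only [List.mem_append, List.mem_singleton]
        rintro (hp | rfl)
        · exact h6 c' he hp
        · exact h he
      by_cases hq : c = c0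
      · subst hq
        exact ⟨t c, List.mem_cons_self, fun j hj hcj => h5 c h j hj hcj⟩
      · rcases hc with ⟨hne, hmem⟩ | hcnt
        · have hmem' : c ∈ l' := by
            rcases List.mem_cons.mp hmem with he | hmem' <;> [exact absurd he hq; exact hmem']
          rcases ih (p ++ [c0]) t (by simpa using hcs) h5 h6' c (Or.inl ⟨hne, hmem'⟩) with ⟨g, hg1, hg2⟩
          exact ⟨g, List.mem_cons_of_mem _ hg1, hg2⟩
        · have : 2 ≤ l'.count c := by
            have hq' : ¬ c0 = c := fun hh => hq hh.symm
            simpa [List.count_cons, beq_iff_eq, hq'] using hcnt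
          rcases ih (p ++ [c0]) t (by simpa using hcs) h5 h6' c (Or.inr this) with ⟨g, hg1, hg2⟩
          exact ⟨g, List.mem_cons_of_mem _ hg1, hg2⟩

-- bridge: A's range-indexing loop is the fold over enumerate
theorem pvA_fold (cs : List Char) (init : List Int × Int) :
    ((PySem.List.pyRange 0 ((cs.length : Int)) 1).foldl
      (fun (st : List Int × Int) i =>
        let c := PySem.List.pyGetD cs i ' '
        if st.1.getD c.toNat 0 = -1 then (st.1.set c.toNat i, st.2)
        else (st.1, min st.2 (st.1.getD c.toNat 0))) init)
    = (PySem.List.enumerate cs 0).foldl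
      (fun (st : List Int × Int) (q : Int × Char) =>
        if st.1.getD q.2.toNat 0 = -1 then (st.1.set q.2.toNat q.1, st.2)
        else (st.1, min st.2 (st.1.getD q.2.toNat 0))) init := by
  rw [PySem.List.enumerate_eq_map_pyRange cs ' ', List.foldl_map]
  rfl

-- bridge: B's append-if loop is filter-then-map
theorem pvB_fold (cs : List Char) :
    ((PySem.List.enumerate cs 0).foldl
      (fun (acc : List Int) (q : Int × Char) => if ((cs.count q.2 : Int)) > 1 then acc ++ [q.1] else acc) [])
    = ((PySem.List.enumerate cs 0).filter (fun q => decide (((cs.count q.2 : Int)) > 1))).map (·.1) := by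
  rw [show (fun (acc : List Int) (q : Int × Char) => if ((cs.count q.2 : Int)) > 1 then acc ++ [q.1] else acc)
      = (fun (acc : List Int) (q : Int × Char) =>
          if (fun (q : Int × Char) => ((cs.count q.2 : Int)) > 1) q then acc ++ [(fun (q : Int × Char) => q.1) q] else acc) from rfl,
    PySem.List.foldl_append_ite]
  simp

-- characterisation of A
theorem pvA_char (test : String) (hdom : Dom_leftmost test) :
    leftmost test = (pvG test.toList 0 (fun _ => -1)).foldl min 99999 := by
  have hdom' : ∀ c ∈ test.toList, c.toNat < 256 := by
    intro c hc
    have := List.all_eq_true.mp hdom c hc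
    simp [pvDomChar] at this
    omega
  unfold leftmost
  simp only [PySem.Str.len_eq]
  rw [pvA_fold test.toList (List.replicate 256 (-1 : Int), (99999 : Int))]
  refine pvAloop test.toList 0 _ 99999 (fun _ => -1) (by rw [List.length_replicate]) hdom' ?_
  intro c hc
  have := hdom' c hc
  simp only [List.getD, List.getElem?_replicate, if_pos this, Option.getD_some]

-- characterisation of B
theorem pvB_char (test : String) :
    leftmost_alt test =
      (((PySem.List.enumerate test.toList 0).filter
        (fun q => decide (((test.toList.count q.2 : Int)) > 1))).map (·.1)).foldl min 99999 := by
  unfold leftmost_alt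
  rw [PySem.Dict.foldl_insert_getD_add_one_eq_counter]
  simp only [PySem.Dict.getD_counter]
  rw [pvB_fold test.toList]
  set F := ((PySem.List.enumerate test.toList 0).filter
    (fun q => decide (((test.toList.count q.2 : Int)) > 1))).map (·.1) with hF
  cases F with
  | nil => simp [PySem.List.min?]
  | cons f0 rest =>
    rw [List.cons_append, PySem.List.min?_id_cons]
    simp only [Option.getD_some]
    rw [List.foldl_append, List.foldl_cons, List.foldl_nil, List.foldl_cons,
      pvFoldlMin_min rest 99999 f0]
    rw [min_comm]

-- ===== VERDICT (by name: the statement is the Claim_ definition above) =====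
theorem leftmost_spec : Claim_equal_leftmost := by
  intro test hdom
  unfold Spec_leftmost
  rw [pvA_char test hdom, pvB_char test]
  set cs := test.toList with hcs
  set F := ((PySem.List.enumerate cs 0).filter
    (fun q => decide (((cs.count q.2 : Int)) > 1))).map (·.1) with hF
  set G := pvG cs 0 (fun _ => -1) with hG
  have hGmem : ∀ x ∈ G, ∃ k : Nat, x = (k : Int) ∧ ∃ hk : k < cs.length, 2 ≤ cs.count cs[k] := by
    rw [hG, show (0 : Int) = (([] : List Char).length : Int) by simp]
    exact pvG_sound cs [] _ cs (by simp) (by intro c h; simp at h)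
  have hFofG : ∀ x ∈ G, ∃ k : Nat, x = (k : Int) ∧ (k : Int) ∈ F := by
    intro x hx
    rcases hGmem x hx with ⟨k, hk1, hk2, hk3⟩
    refine ⟨k, hk1, ?_⟩
    rw [hF]
    refine List.mem_map.mpr ⟨((k : Int), cs[k]), ?_, rfl⟩
    refine List.mem_filter.mpr ⟨?_, by simp; exact_mod_cast hk3⟩
    exact (PySem.List.mem_enumerate_iff _ _ _).mpr ⟨k, hk2, by simp⟩
  have hcover : ∀ f ∈ F, ∃ g ∈ G, g ≤ f := by
    intro f hf
    rw [hF] at hf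
    rcases List.mem_map.mp hf with ⟨q, hq1, hq2⟩
    have hq3 := List.mem_filter.mp hq1
    rcases (PySem.List.mem_enumerate_iff _ _ _).mp hq3.1 with ⟨k, hk, hqk⟩
    have hcnt : 2 ≤ cs.count q.2 := by
      have := hq3.2; simp at this; exact_mod_cast this
    rcases pvG_cover cs [] (fun _ => -1) cs (by simp) (by intro c h; simp at h)
        (by intro c _; simp) q.2 (Or.inr hcnt) with ⟨g, hg1, hg2⟩
    refine ⟨g, by simpa using hg1, ?_⟩
    have := hg2 k hk (by rw [hqk])
    rw [← hq2, hqk]; simpa using this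
  apply le_antisymm
  · exact pvLe_foldlMin F 99999 _ (pvFoldlMin_le_init G 99999) (by
      intro f hf
      rcases hcover f hf with ⟨g, hg1, hg2⟩
      exact le_trans (pvFoldlMin_le_mem G 99999 g hg1) hg2)
  · exact pvLe_foldlMin G 99999 _ (pvFoldlMin_le_init F 99999) (by
      intro x hx
      rcases hFofG x hx with ⟨k, hk1, hk2⟩
      exact hk1 ▸ pvFoldlMin_le_mem F 99999 _ hk2)
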